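-- pv_equiv track=rewrite | github.com/alejocp00/Generalized-Vector-Space-Model-IRS | src/code/boolean_model.py | convert_to_logic
-- ===== SOURCE A (Python) =====
-- def convert_to_logic(query):
--
--     new_doc = []
--
--     for token in query:
--         if token.isalpha():
--             new_doc.append(token)
--
--     logical_query = []
--
--     for i in range(0, len(new_doc)):
--         logical_query.append(new_doc[i])
--         if i < len(new_doc) - 1:
--             logical_query.append("or")
--
--     doc = logical_query
--     # Lista para almacenar los términos clave
--     terms = []
--
--     # Recorrer los tokens de la consulta
--     for token in doc:
--         # Verificar si el token es un sustantivo o un adjetivo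
--         if token == "and":
--             terms.append("AND")
--         elif token == "or":
--             terms.append("OR")
--         elif token == "not":
--             terms.append("NOT")
--         else:
--             terms.append(token)
--
--     # Construir la expresión lógica
--     logic_expr = " ".join(terms)
--
--     return logic_expr
-- ===== SOURCE B (Python) =====
-- _KEYWORDS = {"and": "AND", "or": "OR", "not": "NOT"}
--
-- def convert_to_logic(query):
--     return " OR ".join(_KEYWORDS.get(t, t) for t in query if t.isalpha())
-- ===== Notes on version B (the rewrite author's own statement) =====
-- stated objective: simpler
-- what changed: B drops A's explicit interleaving pass and keyword if/elif loop: the OR separators come from a single " OR ".join over the alphabetic tokens, keyword-uppercased via one dict lookup.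
import Mathlib
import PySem

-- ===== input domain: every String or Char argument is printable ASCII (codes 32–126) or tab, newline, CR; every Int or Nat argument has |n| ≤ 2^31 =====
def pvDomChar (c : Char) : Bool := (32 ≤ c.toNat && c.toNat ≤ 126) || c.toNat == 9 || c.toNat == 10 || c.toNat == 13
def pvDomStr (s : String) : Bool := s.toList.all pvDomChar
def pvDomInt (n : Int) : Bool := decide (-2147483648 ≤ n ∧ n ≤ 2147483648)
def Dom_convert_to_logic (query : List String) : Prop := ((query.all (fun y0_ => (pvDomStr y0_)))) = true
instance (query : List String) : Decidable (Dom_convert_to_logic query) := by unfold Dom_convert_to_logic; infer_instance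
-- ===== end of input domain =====

-- B replaces A's explicit "or"-interleaving pass and keyword if/elif loop by a single " OR ".join
-- over the alphabetic tokens with keywords uppercased via one dict lookup (objective: simpler).

-- ===== PORT A =====
def convert_to_logic (query : List String) : String :=
  let new_doc := query.foldl
    (fun acc token => if PySem.Str.strIsalpha token then acc ++ [token] else acc) []
  let logical_query := (PySem.List.pyRange 0 (new_doc.length : Int) 1).foldl
    (fun acc i =>
      -- new_doc[i]: i ranges over 0..len-1, always in range, so the default is never used
      let acc := acc ++ [PySem.List.pyGetD new_doc i ""]
      if i < (new_doc.length : Int) - 1 then acc ++ ["or"] else acc) []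
  let terms := logical_query.foldl
    (fun acc token =>
      if token == "and" then acc ++ ["AND"]
      else if token == "or" then acc ++ ["OR"]
      else if token == "not" then acc ++ ["NOT"]
      else acc ++ [token]) []
  PySem.Str.join " " terms

-- ===== PORT B =====
def kwTable : PySem.Dict String String :=
  PySem.Dict.ofList [("and", "AND"), ("or", "OR"), ("not", "NOT")]

def convert_to_logic_alt (query : List String) : String :=
  PySem.Str.join " OR "
    ((query.filter (fun t => PySem.Str.strIsalpha t)).map (fun t => kwTable.getD t t))

-- ===== PRECONDITION & SPEC =====
def Spec_convert_to_logic (query : List String) (out : String) : Prop := out = convert_to_logic_alt query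
instance (query : List String) (out : String) : Decidable (Spec_convert_to_logic query out) := by unfold Spec_convert_to_logic; infer_instance

-- ===== CLAIM (what is proved, stated in full; the proofs are below) =====
def Claim_equal_convert_to_logic : Prop := ∀ (query : List String), Dom_convert_to_logic query → Spec_convert_to_logic query (convert_to_logic query)

-- ===== LEMMAS AND PROOFS =====

/-- A's keyword-uppercasing branch chain as a function. -/
def kwA (token : String) : String :=
  if token == "and" then "AND"
  else if token == "or" then "OR"
  else if token == "not" then "NOT"
  else token

/-- A's interleaving result: the list with "or" between consecutive elements. -/
def inter : List String → List String
  | [] => []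
  | [x] => [x]
  | x :: y :: xs => x :: "or" :: inter (y :: xs)

lemma kwTable_getD (t : String) : kwTable.getD t t = kwA t := by
  have h : kwTable = PySem.Dict.mk [("and", "AND"), ("or", "OR"), ("not", "NOT")] := rfl
  rw [h, PySem.Dict.getD_eq_get?_getD]
  simp only [PySem.Dict.get?_mk_cons, beq_iff_eq, kwA]
  split_ifs <;> (try subst_vars) <;> simp_all [PySem.Dict.get?]

lemma inter_cons_of_ne_nil (x : String) {ys : List String} (h : ys ≠ []) :
    inter (x :: ys) = x :: "or" :: inter ys := by
  cases ys with
  | nil => exact absurd rfl h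
  | cons y t => rfl

/-- The index loop over pyRange builds inter of the remaining suffix. -/
lemma flatMap_inter (l : List String) : ∀ (k : Nat) (a : Int), 0 ≤ a → a + k = l.length →
    (PySem.List.pyRange a (l.length : Int) 1).flatMap
      (fun i => [PySem.List.pyGetD l i ""] ++ if i < (l.length : Int) - 1 then ["or"] else []) =
    inter (l.drop a.toNat) := by
  intro k
  induction k with
  | zero =>
    intro a ha hlen
    have : a = (l.length : Int) := by omega
    subst this
    rw [PySem.List.pyRange_one_eq_nil le_rfl]
    simp [inter]
  | succ n ih =>
    intro a ha hlen
    have hab : a < (l.length : Int) := by omega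
    rw [PySem.List.pyRange_one_cons hab]
    rw [List.flatMap_cons]
    have hget : PySem.List.pyGetD l a "" = l[a.toNat]'(by omega) :=
      PySem.List.pyGetD_eq_getElem l "" ha hab
    have hdrop : l.drop a.toNat = l[a.toNat]'(by omega) :: l.drop (a.toNat + 1) :=
      List.drop_eq_getElem_cons (by omega)
    have hsuc : (a + 1).toNat = a.toNat + 1 := by omega
    cases n with
    | zero =>
      have haeq : a = (l.length : Int) - 1 := by omega
      have hcond : ¬ a < (l.length : Int) - 1 := by omega
      rw [if_neg hcond, PySem.List.pyRange_one_eq_nil (by omega)]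
      have hnil : l.drop (a.toNat + 1) = [] := List.drop_eq_nil_of_le (by omega)
      simp [hget, hdrop, hnil, inter]
    | succ m =>
      have hcond : a < (l.length : Int) - 1 := by omega
      rw [if_pos hcond, ih (a + 1) (by omega) (by omega)]
      have hne : l.drop (a.toNat + 1) ≠ [] := by
        have : a.toNat + 1 < l.length := by omega
        simp [List.drop_eq_nil_iff]
        omega
      rw [hdrop, inter_cons_of_ne_nil _ hne, hsuc]
      simp [hget]

lemma inter_ne_nil {l : List String} (h : l ≠ []) : inter l ≠ [] := by
  cases l with
  | nil => exact absurd rfl h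
  | cons x t => cases t <;> simp [inter]

/-- Joining inter with " " after keyword-mapping equals joining the mapped list with " OR ". -/
lemma join_inter (l : List String) :
    PySem.Str.join " " ((inter l).map kwA) = PySem.Str.join " OR " (l.map kwA) := by
  rw [← String.toList_inj]
  simp only [PySem.Str.toList_join, List.map_map]
  induction l using inter.induct with
  | case1 => simp [inter]
  | case2 x => simp [inter, PySem.Chars.join_singleton]
  | case3 x y xs ih =>
    rw [inter_cons_of_ne_nil x (by simp)]
    obtain ⟨h, t, hht⟩ : ∃ h t, inter (y :: xs) = h :: t := by
      cases hi : inter (y :: xs) with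
      | nil => exact absurd hi (inter_ne_nil (by simp))
      | cons h t => exact ⟨h, t, rfl⟩
    simp only [List.map_cons, PySem.Chars.join_cons_cons, hht] at *
    rw [ih]
    simp [List.append_assoc]
    rfl

theorem convert_to_logic_eq (query : List String) :
    convert_to_logic query = convert_to_logic_alt query := by
  unfold convert_to_logic convert_to_logic_alt
  simp only [PySem.List.foldl_append_if_eq_filter, List.nil_append]
  set l := query.filter (fun t => PySem.Str.strIsalpha t) with hl
  have hbody : (fun (acc : List String) (i : Int) =>
      if i < (l.length : Int) - 1 then (acc ++ [PySem.List.pyGetD l i ""]) ++ ["or"]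
      else acc ++ [PySem.List.pyGetD l i ""])
      = fun acc i => acc ++ ([PySem.List.pyGetD l i ""] ++
          if i < (l.length : Int) - 1 then ["or"] else []) := by
    funext acc i; by_cases h : i < (l.length : Int) - 1 <;> simp [h]
  rw [hbody, PySem.List.foldl_append_eq_flatMap,
      flatMap_inter l l.length 0 le_rfl (by simp), List.nil_append, Int.toNat_zero, List.drop_zero]
  have hterms : (fun (acc : List String) (token : String) =>
      if token == "and" then acc ++ ["AND"]
      else if token == "or" then acc ++ ["OR"]
      else if token == "not" then acc ++ ["NOT"]
      else acc ++ [token]) = fun acc token => acc ++ [kwA token] := by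
    funext acc token; unfold kwA; split_ifs <;> rfl
  rw [hterms, PySem.List.foldl_append_singleton_eq_map, List.nil_append]
  rw [show (l.map fun t => kwTable.getD t t) = l.map kwA from
      List.map_congr_left (fun t _ => kwTable_getD t)]
  exact join_inter l

-- ===== VERDICT (by name: the statement is the Claim_ definition above) =====
theorem convert_to_logic_spec : Claim_equal_convert_to_logic := by
  intro query _
  exact convert_to_logic_eq query
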